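-- pv_equiv track=rewrite | github.com/AyushB21/Codevita | form_altering_string.py | calculate_removed_value
-- ===== SOURCE A (Python) =====
-- def calculate_removed_value(bin_str, char_values):
--     length = len(bin_str)
--     total_removed = 0
--     prev_char = None
--     highest_value_idx = -1
--     for idx in range(length):
--         if bin_str[idx] == prev_char:
--             if char_values[idx] > char_values[highest_value_idx]:
--                 total_removed += char_values[highest_value_idx]
--                 highest_value_idx = idx
--             else:
--                 total_removed += char_values[idx]
--         else:
--             prev_char = bin_str[idx]
--             highest_value_idx = idx
--     return total_removed
-- ===== SOURCE B (Python) =====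
-- def calculate_removed_value(bin_str, char_values):
--     # Run-based rewrite: split bin_str into maximal runs of equal characters,
--     # each run contributes sum(values) - max(values); singleton runs contribute 0.
--     total = 0
--     n = len(bin_str)
--     i = 0
--     while i < n:
--         j = i + 1
--         while j < n and bin_str[j] == bin_str[i]:
--             j += 1
--         if j - i > 1:
--             vals = [char_values[k] for k in range(i, j)]
--             total += sum(vals) - max(vals)
--         i = j
--     return total
-- ===== Notes on version B (the rewrite author's own statement) =====
-- stated objective: alternative
-- what changed: B decomposes the string into maximal runs of equal characters (outer scan plus inner run scan) and adds sum(vals) - max(vals) per run, replacing A's single-pass bookkeeping of the running highest-value index; it trades a materialised per-run value list for eliminating that index tracking.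
import Mathlib
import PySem

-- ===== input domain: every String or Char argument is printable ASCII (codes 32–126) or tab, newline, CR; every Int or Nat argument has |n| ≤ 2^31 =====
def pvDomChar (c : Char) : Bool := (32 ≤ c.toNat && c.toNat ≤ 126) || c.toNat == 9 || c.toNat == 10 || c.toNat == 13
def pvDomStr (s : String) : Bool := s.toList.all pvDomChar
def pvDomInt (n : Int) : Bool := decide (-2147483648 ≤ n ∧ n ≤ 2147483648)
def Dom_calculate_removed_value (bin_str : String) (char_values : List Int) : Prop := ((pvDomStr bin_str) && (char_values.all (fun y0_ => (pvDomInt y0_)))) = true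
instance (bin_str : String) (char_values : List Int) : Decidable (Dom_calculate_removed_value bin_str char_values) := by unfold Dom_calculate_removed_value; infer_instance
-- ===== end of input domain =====

-- B replaces A's single-pass max-index bookkeeping by splitting the string into
-- maximal runs of equal characters and adding sum(vals) - max(vals) per run (alternative decomposition, same cost).

-- ===== PORT A =====
-- loop body of A: state (total_removed, prev_char, highest_value_idx);
-- bin_str[idx] is ported on bin_str.toList via PySem.List.pyGet? (exact: = PySem.Str.pyGet?);
-- char_values[idx] via pyGetD (exact under Pre_, which puts every accessed index in range)
def pvStepA (cs : List Char) (cv : List Int) (st : Int × Option Char × Int) (idx : Int) : Int × Option Char × Int :=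
  if PySem.List.pyGet? cs idx == st.2.1 then
    if PySem.List.pyGetD cv idx 0 > PySem.List.pyGetD cv st.2.2 0 then
      (st.1 + PySem.List.pyGetD cv st.2.2 0, st.2.1, idx)
    else
      (st.1 + PySem.List.pyGetD cv idx 0, st.2.1, st.2.2)
  else
    (st.1, PySem.List.pyGet? cs idx, idx)

def calculate_removed_value (bin_str : String) (char_values : List Int) : Int :=
  let cs := bin_str.toList
  let length : Int := (cs.length : Int)
  ((PySem.List.pyRange 0 length 1).foldl (pvStepA cs char_values) (0, none, -1)).1

-- ===== PORT B =====
-- inner while loop of B: length of the maximal prefix of l equal to c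
def pvAltRunLen (c : Char) : List Char → Nat
  | [] => 0
  | d :: rest => if d = c then pvAltRunLen c rest + 1 else 0

-- outer while loop of B: i is the absolute index of the head of the remaining suffix
def pvAltGo (cv : List Int) : List Char → Int → Int
  | [], _ => 0
  | c :: rest, i =>
    let k := pvAltRunLen c rest
    let contrib :=
      if 0 < k then
        let vals := (PySem.List.pyRange i (i + (k : Int) + 1) 1).map (fun t => PySem.List.pyGetD cv t 0)
        vals.sum - ((PySem.List.max? vals (fun x => x)).getD 0)
      else 0
    contrib + pvAltGo cv (rest.drop k) (i + (k : Int) + 1)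
  termination_by l _ => l.length
  decreasing_by simp

def calculate_removed_value_alt (bin_str : String) (char_values : List Int) : Int :=
  pvAltGo char_values bin_str.toList 0

-- ===== PRECONDITION & SPEC =====
-- Pre_ excludes exactly the inputs on which A raises IndexError: some index lying in a run of
-- length ≥ 2 is out of range for char_values (A touches char_values only at such indices).
def Pre_calculate_removed_value (bin_str : String) (char_values : List Int) : Prop :=
  ∀ i < bin_str.toList.length, i + 1 < bin_str.toList.length →
    bin_str.toList.getD i 'a' = bin_str.toList.getD (i + 1) 'a' → i + 1 < char_values.length
instance (bin_str : String) (char_values : List Int) : Decidable (Pre_calculate_removed_value bin_str char_values) := by unfold Pre_calculate_removed_value; infer_instance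
def pvWitness_calculate_removed_value : String × List Int := ("aab", [1, 2, 3])

def Spec_calculate_removed_value (bin_str : String) (char_values : List Int) (out : Int) : Prop := out = calculate_removed_value_alt bin_str char_values
instance (bin_str : String) (char_values : List Int) (out : Int) : Decidable (Spec_calculate_removed_value bin_str char_values out) := by unfold Spec_calculate_removed_value; infer_instance

-- ===== CLAIM (what is proved, stated in full; the proofs are below) =====
def Claim_equal_calculate_removed_value : Prop := ∀ (bin_str : String) (char_values : List Int), Dom_calculate_removed_value bin_str char_values → Pre_calculate_removed_value bin_str char_values → Spec_calculate_removed_value bin_str char_values (calculate_removed_value bin_str char_values)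

-- ===== LEMMAS AND PROOFS =====

lemma pvAltGo_nil (cv : List Int) (i : Int) : pvAltGo cv [] i = 0 := by
  rw [pvAltGo]

lemma pvAltGo_cons (cv : List Int) (c : Char) (rest : List Char) (i : Int) :
    pvAltGo cv (c :: rest) i =
      (if 0 < pvAltRunLen c rest then
        ((PySem.List.pyRange i (i + (pvAltRunLen c rest : Int) + 1) 1).map (fun t => PySem.List.pyGetD cv t 0)).sum
          - ((PySem.List.max? ((PySem.List.pyRange i (i + (pvAltRunLen c rest : Int) + 1) 1).map (fun t => PySem.List.pyGetD cv t 0)) (fun x => x)).getD 0)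
      else 0) + pvAltGo cv (rest.drop (pvAltRunLen c rest)) (i + (pvAltRunLen c rest : Int) + 1) := by
  rw [pvAltGo]

lemma pvRunLen_le (c : Char) (l : List Char) : pvAltRunLen c l ≤ l.length := by
  induction l with
  | nil => simp [pvAltRunLen]
  | cons d rest ih => simp only [pvAltRunLen]; split <;> simp_all <;> omega

lemma pvRunLen_get (c : Char) (l : List Char) : ∀ u, u < pvAltRunLen c l → l[u]? = some c := by
  induction l with
  | nil => simp [pvAltRunLen]
  | cons d rest ih =>
    intro u hu
    simp only [pvAltRunLen] at hu
    split at hu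
    · cases u with
      | zero => simp_all
      | succ v => simpa using ih v (by omega)
    · omega

lemma pvRunLen_drop_head (c : Char) (l : List Char) :
    ∀ d, (l.drop (pvAltRunLen c l)).head? = some d → d ≠ c := by
  induction l with
  | nil => simp
  | cons e rest ih =>
    intro d hd
    simp only [pvAltRunLen] at hd
    split at hd
    · exact ih d (by simpa using hd)
    · rename_i hne; simp at hd; subst hd; exact hne

-- running the A-loop over one run tail (indices s .. s+m-1, all chars = c, prev = some c):
-- prev stays some c, total + value(highest) accumulates the run sum, value(highest) is the running max
lemma pvInner (cv : List Int) (cs : List Char) (c : Char) (m : Nat) :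
    ∀ (s t h : Int),
    (∀ u : Nat, u < m → PySem.List.pyGet? cs (s + u) = some c) →
    (((PySem.List.pyRange s (s + m) 1).foldl (pvStepA cs cv) (t, some c, h)).2.1 = some c)
    ∧ (((PySem.List.pyRange s (s + m) 1).foldl (pvStepA cs cv) (t, some c, h)).1
        + PySem.List.pyGetD cv ((PySem.List.pyRange s (s + m) 1).foldl (pvStepA cs cv) (t, some c, h)).2.2 0
        = t + PySem.List.pyGetD cv h 0
          + (((PySem.List.pyRange s (s + m) 1).map (fun j => PySem.List.pyGetD cv j 0)).sum))
    ∧ (PySem.List.pyGetD cv ((PySem.List.pyRange s (s + m) 1).foldl (pvStepA cs cv) (t, some c, h)).2.2 0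
        = ((PySem.List.pyRange s (s + m) 1).map (fun j => PySem.List.pyGetD cv j 0)).foldl max (PySem.List.pyGetD cv h 0)) := by
  induction m with
  | zero =>
    intro s t h _
    simp [PySem.List.pyRange_one_eq_nil]
  | succ m ih =>
    intro s t h hrun
    have hcons : PySem.List.pyRange s (s + (m+1:ℕ)) 1 = s :: PySem.List.pyRange (s+1) (s + (m+1:ℕ)) 1 :=
      PySem.List.pyRange_one_cons (by push_cast; omega)
    have hub : s + ((m+1:ℕ) : Int) = (s+1) + (m : ℕ) := by push_cast; ring
    have hc0 : PySem.List.pyGet? cs s = some c := by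
      have := hrun 0 (by omega); simpa using this
    have hrun' : ∀ u : Nat, u < m → PySem.List.pyGet? cs (s + 1 + u) = some c := by
      intro u hu
      have := hrun (u+1) (by omega)
      rwa [show s + ((u+1:ℕ) : Int) = s + 1 + u by push_cast; ring] at this
    rw [hcons, hub]
    rw [List.foldl_cons, List.map_cons, List.sum_cons, List.foldl_cons]
    have hstep : pvStepA cs cv (t, some c, h) s =
        if PySem.List.pyGetD cv s 0 > PySem.List.pyGetD cv h 0 then
          (t + PySem.List.pyGetD cv h 0, some c, s)
        else (t + PySem.List.pyGetD cv s 0, some c, h) := by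
      simp [pvStepA, hc0]
    by_cases hgt : PySem.List.pyGetD cv s 0 > PySem.List.pyGetD cv h 0
    · rw [hstep, if_pos hgt]
      obtain ⟨h1, h2, h3⟩ := ih (s+1) (t + PySem.List.pyGetD cv h 0) s hrun'
      refine ⟨h1, by linarith, ?_⟩
      rw [h3]
      congr 1
      omega
    · rw [hstep, if_neg hgt]
      obtain ⟨h1, h2, h3⟩ := ih (s+1) (t + PySem.List.pyGetD cv s 0) h hrun'
      refine ⟨h1, by linarith, ?_⟩
      rw [h3]
      congr 1
      omega

-- the A-loop from the start of a run boundary computes its start state plus B's remaining total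
theorem pvMain (cv : List Int) (cs : List Char) :
    ∀ (suf pre : List Char), cs = pre ++ suf →
    ∀ st : Int × Option Char × Int,
    (∀ c, suf.head? = some c → st.2.1 ≠ some c) →
    ((PySem.List.pyRange (pre.length) (cs.length) 1).foldl (pvStepA cs cv) st).1
      = st.1 + pvAltGo cv suf (pre.length)
  | [], pre, hcs, st, _ => by
    subst hcs
    simp [pvAltGo_nil, PySem.List.pyRange_one_eq_nil]
  | c :: rest, pre, hcs, st, hf => by
    subst hcs
    have hkle : pvAltRunLen c rest ≤ rest.length := pvRunLen_le c rest
    set s : Int := (pre.length : Int) with hs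
    set k : Nat := pvAltRunLen c rest with hk
    have hsplit : PySem.List.pyRange s ((pre ++ c :: rest).length) 1
        = PySem.List.pyRange s (s + 1 + k) 1
          ++ PySem.List.pyRange (s + 1 + k) ((pre ++ c :: rest).length) 1 :=
      PySem.List.pyRange_one_append _ _ _ (by omega) (by simp; omega)
    have hcons1 : PySem.List.pyRange s (s + 1 + k) 1 = s :: PySem.List.pyRange (s + 1) (s + 1 + k) 1 :=
      PySem.List.pyRange_one_cons (by omega)
    have hgets : PySem.List.pyGet? (pre ++ c :: rest) s = some c := by
      rw [hs]; exact PySem.List.pyGet?_append_length pre rest c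
    have hne : (PySem.List.pyGet? (pre ++ c :: rest) s == st.2.1) = false := by
      rw [hgets]
      exact beq_eq_false_iff_ne.mpr (fun h => hf c rfl h.symm)
    have hstep1 : pvStepA (pre ++ c :: rest) cv st s = (st.1, some c, s) := by
      rw [pvStepA, hne]; simp [hgets]
    have hrunIn : ∀ u : Nat, u < k → PySem.List.pyGet? (pre ++ c :: rest) (s + 1 + u) = some c := by
      intro u hu
      have harith : s + 1 + (u : Int) = (pre.length : Int) + ((1 + u : Nat) : Int) := by push_cast; ring
      rw [harith, PySem.List.pyGet?_append_right]
      rw [Nat.add_comm 1 u]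
      simpa using pvRunLen_get c rest u hu
    obtain ⟨hr1, hr2, hr3⟩ := pvInner cv (pre ++ c :: rest) c k (s + 1) st.1 s hrunIn
    set r := (PySem.List.pyRange (s + 1) (s + 1 + (k : Int)) 1).foldl (pvStepA (pre ++ c :: rest) cv) (st.1, some c, s) with hr
    have hpre' : ((pre ++ c :: rest.take k).length : Int) = s + 1 + k := by
      simp [List.length_take]; omega
    have hrec := pvMain cv (pre ++ c :: rest) (rest.drop k) (pre ++ c :: rest.take k)
      (by simp)
      r
      (by intro d hd hcontra
          have hdc : d ≠ c := pvRunLen_drop_head c rest d hd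
          rw [hr1] at hcontra
          exact hdc (by simpa using hcontra.symm))
    rw [hpre'] at hrec
    rw [hsplit, List.foldl_append, hcons1, List.foldl_cons, hstep1, ← hr, hrec, pvAltGo_cons, ← hk]
    have hub : s + (k : Int) + 1 = s + 1 + (k : Int) := by ring
    rw [hub]
    have hvals : (PySem.List.pyRange s (s + 1 + (k : Int)) 1).map (fun t => PySem.List.pyGetD cv t 0)
        = PySem.List.pyGetD cv s 0 :: (PySem.List.pyRange (s + 1) (s + 1 + (k : Int)) 1).map (fun t => PySem.List.pyGetD cv t 0) := by
      rw [hcons1, List.map_cons]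
    by_cases hkpos : 0 < k
    · rw [if_pos hkpos, hvals, List.sum_cons,
        PySem.List.max?_id_cons, List.foldl_map]
      simp only [Option.getD_some]
      have hr3' : PySem.List.pyGetD cv r.2.2 0
          = ((PySem.List.pyRange (s + 1) (s + 1 + (k : Int)) 1).map (fun j => PySem.List.pyGetD cv j 0)).foldl max (PySem.List.pyGetD cv s 0) := hr3
      rw [List.foldl_map] at hr3'
      have hr2' := hr2
      linarith [hr2', hr3']
    · have hk0 : k = 0 := by omega
      rw [if_neg hkpos]
      have hempty : PySem.List.pyRange (s + 1) (s + 1 + (k : Int)) 1 = [] := by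
        rw [hk0]; exact PySem.List.pyRange_one_eq_nil (by push_cast; omega)
      rw [hempty] at hr2 hr3
      simp at hr2 hr3
      linarith [hr2, hr3]
  termination_by suf => suf.length
  decreasing_by simp

-- ===== VERDICT (by name: the statement is the Claim_ definition above) =====
theorem calculate_removed_value_spec : Claim_equal_calculate_removed_value := by
  intro bin_str char_values _ _
  unfold Spec_calculate_removed_value calculate_removed_value calculate_removed_value_alt
  have := pvMain char_values bin_str.toList bin_str.toList [] rfl (0, none, -1) (by intro c _ h; simp at h)
  simpa using this
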